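-- pv_equiv track=rewrite | github.com/Shunpoco/leetcode | maximum-score-from-removing-substrings/main.py | calc
-- ===== SOURCE A (Python) =====
-- def calc(s, v, st):
--     r = 0
--     stack = []
--
--     for c in s:
--         if len(stack) > 0 and stack[-1]+c == st:
--             r += v
--             stack.pop(-1)
--         else:
--             stack.append(c)
--
--     return (''.join(stack), r)
-- ===== SOURCE B (Python) =====
-- def calc(s, v, st):
--     # Repeated whole-string replacement instead of a character stack: the
--     # 2-char-deletion rewrite is confluent, so the normal form equals the
--     # stack residue, and the score is v * (number of deleted pairs).
--     if len(st) != 2: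
--         return (s, 0)
--     result = s
--     while st in result:
--         result = result.replace(st, '')
--     return (result, v * (len(s) - len(result)) // 2)
-- ===== Notes on version B (the rewrite author's own statement) =====
-- stated objective: alternative
-- what changed: Replaces the single-pass character stack (pop on match, count pops) by a guard on len(st)==2 plus repeated whole-string str.replace until no occurrence remains (the 2-char deletion rewrite is confluent, so the normal form equals the stack residue), with the score recovered arithmetically as v*(len(s)-len(result))//2.
import Mathlib
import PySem

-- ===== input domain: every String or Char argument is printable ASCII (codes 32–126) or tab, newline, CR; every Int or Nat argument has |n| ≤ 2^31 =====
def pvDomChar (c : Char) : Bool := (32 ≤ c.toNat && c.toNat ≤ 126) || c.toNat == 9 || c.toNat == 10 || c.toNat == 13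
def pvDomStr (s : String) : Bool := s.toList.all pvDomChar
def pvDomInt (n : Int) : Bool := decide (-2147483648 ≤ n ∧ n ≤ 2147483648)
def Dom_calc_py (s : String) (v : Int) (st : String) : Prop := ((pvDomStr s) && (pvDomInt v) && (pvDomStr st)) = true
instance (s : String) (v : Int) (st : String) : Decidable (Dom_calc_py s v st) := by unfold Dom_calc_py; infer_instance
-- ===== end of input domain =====

-- B replaces A's single-pass character stack by a len(st)==2 guard plus repeated
-- whole-string replace-until-fixpoint (the 2-char deletion rewrite is confluent);
-- objective: alternative (same results by a genuinely different mechanism).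


-- ===== PORT A =====
-- stack is kept top-first (Python's stack[-1] is the head); ''.join reverses it back
def calcStep (v : Int) (stl : List Char) (acc : List Char × Int) (c : Char) : List Char × Int :=
  match acc with
  | (stack, r) =>
    match stack with
    | t :: rest => if [t, c] = stl then (rest, r + v) else (c :: t :: rest, r)
    | [] => ([c], r)

def calc_py (s : String) (v : Int) (st : String) : String × Int :=
  let res := s.toList.foldl (calcStep v st.toList) ([], 0)
  (String.ofList res.1.reverse, res.2)

-- ===== PORT B =====
-- termination fact for the while-loop: replacing a present 2-char pattern by '' shortens the string
theorem replaceGo_len (p q : Char) :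
    ∀ fuel l acc : _, (PySem.Chars.replace.go [p, q] [] fuel l acc).length ≤ acc.length + l.length ∧
      (l.length ≤ fuel → [p, q] <:+: l →
        (PySem.Chars.replace.go [p, q] [] fuel l acc).length < acc.length + l.length) := by
  intro fuel
  induction fuel with
  | zero =>
    intro l acc
    constructor
    · simp [PySem.Chars.replace.go]
    · intro hle hinf
      have hl : l = [] := List.length_eq_zero_iff.mp (Nat.le_zero.mp hle)
      subst hl
      simp at hinf
  | succ n ih =>
    intro l acc
    cases l with
    | nil =>
      constructor
      · simp [PySem.Chars.replace.go]
      · intro _ hinf; simp at hinf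
    | cons c t =>
      by_cases hpre : [p, q].isPrefixOf (c :: t) = true
      · have hp : [p, q] <+: (c :: t) := List.isPrefixOf_iff_prefix.mp hpre
        have hl2 : 2 ≤ (c :: t).length := by simpa using hp.length_le
        have hgo : PySem.Chars.replace.go [p, q] [] (n + 1) (c :: t) acc
            = PySem.Chars.replace.go [p, q] [] n ((c :: t).drop 2) acc := by
          simp [PySem.Chars.replace.go, hpre]
        rw [hgo]
        have h1 := (ih ((c :: t).drop 2) acc).1
        have hdl : ((c :: t).drop 2).length = (c :: t).length - 2 := by
          simp
        constructor
        · simp only [List.length_cons] at hl2 h1 hdl ⊢; omega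
        · intro _ _; simp only [List.length_cons] at hl2 h1 hdl ⊢; omega
      · have hgo : PySem.Chars.replace.go [p, q] [] (n + 1) (c :: t) acc
            = PySem.Chars.replace.go [p, q] [] n t (c :: acc) := by
          simp [PySem.Chars.replace.go, hpre]
        rw [hgo]
        have h1 := (ih t (c :: acc)).1
        constructor
        · simp only [List.length_cons] at h1 ⊢; omega
        · intro hle hinf
          have hinf' : [p, q] <:+: t := by
            rcases List.infix_cons_iff.mp hinf with h | h
            · exact absurd (List.isPrefixOf_iff_prefix.mpr h) hpre
            · exact h
          have h2 := (ih t (c :: acc)).2 (by simpa using Nat.lt_succ_iff.mp (by simpa using hle)) hinf'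
          simp only [List.length_cons] at h2 ⊢; omega

theorem replace_len_lt (p q : Char) (l : List Char)
    (h : PySem.Chars.isIn [p, q] l = true) :
    (PySem.Chars.replace l [p, q] []).length < l.length := by
  have hinf : [p, q] <:+: l := (PySem.Chars.isIn_iff_infix _ _).mp h
  have := (replaceGo_len p q l.length l []).2 le_rfl hinf
  simpa [PySem.Chars.replace] using this

-- while st in result: result = result.replace(st, '')
def calcAltLoop (p q : Char) (result : List Char) : List Char :=
  if h : PySem.Chars.isIn [p, q] result = true then
    calcAltLoop p q (PySem.Chars.replace result [p, q] [])
  else result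
termination_by result.length
decreasing_by exact replace_len_lt p q result h

def calc_py_alt (s : String) (v : Int) (st : String) : String × Int :=
  match st.toList with
  | [p, q] =>
    let result := calcAltLoop p q s.toList
    (String.ofList result,
      PySem.Int.floordiv (v * ((s.toList.length : Int) - (result.length : Int))) 2)
  | _ => (s, 0)

-- ===== PRECONDITION & SPEC =====
def Spec_calc_py (s : String) (v : Int) (st : String) (out : String × Int) : Prop := out = calc_py_alt s v st
instance (s : String) (v : Int) (st : String) (out : String × Int) : Decidable (Spec_calc_py s v st out) := by unfold Spec_calc_py; infer_instance

-- ===== CLAIM (what is proved, stated in full; the proofs are below) =====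
def Claim_equal_calc_py : Prop := ∀ (s : String) (v : Int) (st : String), Dom_calc_py s v st → Spec_calc_py s v st (calc_py s v st)

-- ===== LEMMAS AND PROOFS =====

-- the stack transition on its own (first component of calcStep for a 2-char pattern)
def redStep (p q : Char) (S : List Char) (c : Char) : List Char :=
  match S with
  | t :: rest => if t = p ∧ c = q then rest else c :: t :: rest
  | [] => [c]

-- invariant of reachable stacks: no adjacent matched pair survives inside the stack
def StInv (p q : Char) (S : List Char) : Prop := ¬ [q, p] <:+: S

theorem stInv_nil (p q : Char) : StInv p q [] := by
  intro h
  simpa using h.length_le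

theorem stInv_step (p q : Char) (S : List Char) (c : Char) (h : StInv p q S) :
    StInv p q (redStep p q S c) := by
  cases S with
  | nil =>
    intro hinf
    have := hinf.length_le
    simp [redStep] at this
  | cons t rest =>
    by_cases hc : t = p ∧ c = q
    · simp only [redStep, if_pos hc]
      intro hinf
      exact h (List.infix_cons_iff.mpr (Or.inr hinf))
    · simp only [redStep, if_neg hc]
      intro hinf
      rcases List.infix_cons_iff.mp hinf with hpre | htail
      · obtain ⟨w, hw⟩ := hpre
        have h3 : c = q ∧ t = p ∧ rest = w := by simpa using hw.symm
        exact hc ⟨h3.2.1, h3.1⟩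
      · exact h htail

theorem stInv_fold (p q : Char) (l : List Char) :
    ∀ S, StInv p q S → StInv p q (List.foldl (redStep p q) S l) := by
  induction l with
  | nil => intro S h; exact h
  | cons c t ih => intro S h; exact ih _ (stInv_step p q S c h)

theorem red_pq (p q : Char) (S : List Char) (h : StInv p q S) :
    redStep p q (redStep p q S p) q = S := by
  cases S with
  | nil => simp [redStep]
  | cons t rest =>
    by_cases hc : t = p ∧ p = q
    · have hcond : redStep p q (t :: rest) p = rest := by simp [redStep, hc]
      rw [hcond]
      cases rest with
      | nil => simp [redStep, hc.1, hc.2]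
      | cons t2 rest2 =>
        have ht2 : ¬ t2 = q := by
          intro hcc
          apply h
          exact ⟨[], rest2, by simp [hc.1, hcc, hc.2]⟩
        simp [redStep, ht2, hc.1, hc.2]
    · simp only [redStep, if_neg hc]
      simp

theorem fold_delete (p q : Char) (a b : List Char) (S : List Char) (h : StInv p q S) :
    List.foldl (redStep p q) S (a ++ p :: q :: b) = List.foldl (redStep p q) S (a ++ b) := by
  rw [List.foldl_append, List.foldl_append]
  have hS' : StInv p q (List.foldl (redStep p q) S a) := stInv_fold p q a S h
  simp only [List.foldl_cons]
  rw [red_pq p q _ hS']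

theorem fold_replaceGo (p q : Char) :
    ∀ fuel l acc S, l.length ≤ fuel → StInv p q S →
      List.foldl (redStep p q) S (PySem.Chars.replace.go [p, q] [] fuel l acc)
        = List.foldl (redStep p q) S (acc.reverse ++ l) := by
  intro fuel
  induction fuel with
  | zero =>
    intro l acc S hle _
    have : l = [] := List.length_eq_zero_iff.mp (Nat.le_zero.mp hle)
    subst this
    simp [PySem.Chars.replace.go]
  | succ n ih =>
    intro l acc S hle hS
    cases l with
    | nil => simp [PySem.Chars.replace.go]
    | cons c t =>
      by_cases hpre : [p, q].isPrefixOf (c :: t) = true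
      · have hp : [p, q] <+: (c :: t) := List.isPrefixOf_iff_prefix.mp hpre
        obtain ⟨t', ht'⟩ := hp
        have hgo : PySem.Chars.replace.go [p, q] [] (n + 1) (c :: t) acc
            = PySem.Chars.replace.go [p, q] [] n ((c :: t).drop 2) acc := by
          simp [PySem.Chars.replace.go, hpre]
        have hdrop : (c :: t).drop 2 = t' := by rw [← ht']; simp
        have hlt' : t'.length ≤ n := by
          have := congrArg List.length ht'
          simp at this hle
          omega
        rw [hgo, hdrop, ih t' acc S hlt' hS, ← ht']
        exact (fold_delete p q acc.reverse t' S hS).symm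
      · have hgo : PySem.Chars.replace.go [p, q] [] (n + 1) (c :: t) acc
            = PySem.Chars.replace.go [p, q] [] n t (c :: acc) := by
          simp [PySem.Chars.replace.go, hpre]
        rw [hgo, ih t (c :: acc) S (by simp at hle ⊢; omega) hS]
        simp

theorem fold_replace (p q : Char) (u S : List Char) (h : StInv p q S) :
    List.foldl (redStep p q) S (PySem.Chars.replace u [p, q] [])
      = List.foldl (redStep p q) S u := by
  have := fold_replaceGo p q u.length u [] S le_rfl h
  simpa [PySem.Chars.replace] using this

theorem fold_loop (p q : Char) (u : List Char) :
    List.foldl (redStep p q) [] (calcAltLoop p q u) = List.foldl (redStep p q) [] u := by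
  fun_induction calcAltLoop p q u with
  | case1 u h ih =>
    rw [ih, fold_replace p q u [] (stInv_nil p q)]
  | case2 u h => rfl

theorem loop_noOcc (p q : Char) (u : List Char) :
    PySem.Chars.isIn [p, q] (calcAltLoop p q u) = false := by
  fun_induction calcAltLoop p q u with
  | case1 u h ih => exact ih
  | case2 u h => simpa using h

theorem fold_normal (p q : Char) :
    ∀ u S, ¬ [p, q] <:+: (S.reverse ++ u) →
      List.foldl (redStep p q) S u = u.reverse ++ S := by
  intro u
  induction u with
  | nil => intro S _; simp
  | cons c t ih =>
    intro S h
    cases S with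
    | nil =>
      simp only [List.foldl_cons, redStep]
      rw [ih [c] (by simpa using h)]
      simp
    | cons t0 rest =>
      by_cases hc : t0 = p ∧ c = q
      · exfalso
        apply h
        obtain ⟨rfl, rfl⟩ := hc
        exact ⟨rest.reverse, t, by simp⟩
      · simp only [List.foldl_cons, redStep, if_neg hc]
        rw [ih (c :: t0 :: rest) (by simpa using h)]
        simp

-- A's fold, first component, equals the pure stack fold
theorem foldA_fst (p q : Char) (v : Int) :
    ∀ l (S : List Char) (r : Int),
      (List.foldl (calcStep v [p, q]) (S, r) l).1 = List.foldl (redStep p q) S l := by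
  intro l
  induction l with
  | nil => intro S r; rfl
  | cons c t ih =>
    intro S r
    cases S with
    | nil => simp only [List.foldl_cons, calcStep, redStep]; exact ih [c] r
    | cons t0 rest =>
      by_cases hc : t0 = p ∧ c = q
      · obtain ⟨rfl, rfl⟩ := hc
        simpa [calcStep, redStep] using ih rest (r + v)
      · have hne : ¬ [t0, c] = [p, q] := by
          intro hh
          exact hc (by simpa using hh)
        simp only [List.foldl_cons, calcStep, redStep, if_neg hne, if_neg hc]
        exact ih (c :: t0 :: rest) r

-- A's score invariant: 2*r = v*(chars consumed - stack growth)
theorem foldA_snd (p q : Char) (v : Int) :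
    ∀ l (S : List Char) (r : Int),
      2 * (List.foldl (calcStep v [p, q]) (S, r) l).2
        = 2 * r + v * (((S.length : Int) + l.length) - ((List.foldl (calcStep v [p, q]) (S, r) l).1.length)) := by
  intro l
  induction l with
  | nil => intro S r; simp
  | cons c t ih =>
    intro l r
    cases l with
    | nil =>
      simp only [List.foldl_cons, calcStep]
      rw [ih [c] r]
      push_cast [List.length_cons]
      ring
    | cons t0 rest =>
      by_cases hc : [t0, c] = [p, q]
      · simp only [List.foldl_cons, calcStep, if_pos hc]
        rw [ih rest (r + v)]
        push_cast [List.length_cons]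
        ring
      · simp only [List.foldl_cons, calcStep, if_neg hc]
        rw [ih (c :: t0 :: rest) r]
        push_cast [List.length_cons]
        ring

-- A when the pattern length is not 2: the pop branch never fires
theorem foldA_other (v : Int) (stl : List Char) (hlen : stl.length ≠ 2) :
    ∀ l (S : List Char) (r : Int),
      List.foldl (calcStep v stl) (S, r) l = (l.reverse ++ S, r) := by
  intro l
  induction l with
  | nil => intro S r; simp
  | cons c t ih =>
    intro S r
    cases S with
    | nil =>
      simp only [List.foldl_cons, calcStep]
      rw [ih [c] r]
      simp
    | cons t0 rest =>
      have hne : ¬ [t0, c] = stl := by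
        intro hh
        exact hlen (hh ▸ rfl)
      simp only [List.foldl_cons, calcStep, if_neg hne]
      rw [ih (c :: t0 :: rest) r]
      simp

-- ===== VERDICT (by name: the statement is the Claim_ definition above) =====
theorem calc_py_spec : Claim_equal_calc_py := by
  intro s v st _dom
  unfold Spec_calc_py calc_py calc_py_alt
  rcases hst : st.toList with _ | ⟨p, tl⟩
  · rw [foldA_other v [] (by simp) s.toList [] 0]
    simp [String.ofList_toList]
  · rcases tl with _ | ⟨q, tl2⟩
    · rw [foldA_other v [p] (by simp) s.toList [] 0]
      simp [String.ofList_toList]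
    · rcases tl2 with _ | ⟨x, tl3⟩
      · -- st.toList = [p, q], the real case
        have hfst := foldA_fst p q v s.toList [] 0
        have hsnd := foldA_snd p q v s.toList [] 0
        set F := List.foldl (calcStep v [p, q]) (([] : List Char), (0 : Int)) s.toList with hF
        set t := calcAltLoop p q s.toList with ht
        have hred : List.foldl (redStep p q) [] t = List.foldl (redStep p q) [] s.toList :=
          fold_loop p q s.toList
        have hnf : t = (List.foldl (redStep p q) [] t).reverse := by
          have hno : ¬ [p, q] <:+: t := by
            have := loop_noOcc p q s.toList
            rw [← ht] at this
            exact (PySem.Chars.isIn_eq_false_iff _ _).mp this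
          rw [fold_normal p q t [] (by simpa using hno)]
          simp
        have hstack : t = F.1.reverse := by
          rw [hnf, hred, ← hfst]
        show (String.ofList F.1.reverse, F.2)
            = (String.ofList t, PySem.Int.floordiv (v * ((s.toList.length : Int) - (t.length : Int))) 2)
        rw [Prod.mk.injEq]
        refine ⟨by rw [hstack], ?_⟩
        have hlen2 : (t.length : Int) = F.1.length := by
          rw [hstack]; simp
        have hv : v * ((s.toList.length : Int) - (t.length : Int)) = 2 * F.2 := by
          rw [hlen2, hsnd]
          push_cast [List.length_nil]
          ring
        rw [hv, PySem.Int.floordiv_eq_ediv_of_pos (by norm_num)]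
        omega
      · rw [foldA_other v (p :: q :: x :: tl3) (by simp) s.toList [] 0]
        simp [String.ofList_toList]
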